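-- pv_equiv track=rewrite | github.com/jayantsolanki/EPIJudgePython | epi_judge_python/16-01-number_of_score_combinations.py | num_combinations_for_final_score_sequences
-- ===== SOURCE A (Python) =====
-- from typing import List
--
-- def num_combinations_for_final_score_sequences(final_score: int,
--                                      individual_play_scores: List[int]) -> int:
--     dp = [0 for _ in range((final_score + 1))]
--     dp[0] = 1
--     for x in range(1, final_score + 1):
--         for score in individual_play_scores:
--             if score <= x:
--                 dp[x] = dp[x]+ dp[x - score]
--     return dp[-1]
-- ===== SOURCE B (Python) =====
-- from typing import List
--
-- def num_combinations_for_final_score_sequences(final_score: int,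
--                                      individual_play_scores: List[int]) -> int:
--     # Demand-driven memoization with an explicit DFS work stack: resolve only the
--     # totals actually reachable from final_score, caching counts in a dict.
--     cache = {0: 1}
--     stack = [final_score]
--     while stack:
--         n = stack[-1]
--         if n in cache:
--             stack.pop()
--             continue
--         missing = [n - s for s in individual_play_scores
--                    if s <= n and n - s not in cache]
--         if missing:
--             stack.extend(missing)
--         else:
--             cache[n] = sum(cache[n - s] for s in individual_play_scores if s <= n)
--             stack.pop()
--     return cache[final_score]
-- ===== Notes on version B (the rewrite author's own statement) =====
-- stated objective: alternative
-- what changed: Replaces A's bottom-up dp array swept over every total 1..final_score with demand-driven memoization: an explicit DFS work stack resolves only the totals reachable from final_score, storing their counts in a dict.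
-- outside the precondition, e.g. on num_combinations_for_final_score_sequences(2, [1, 0]): A returns 4, B does not finish within the time limit; on num_combinations_for_final_score_sequences(3, [-1, 2]): A raises IndexError, B does not finish within the time limit; on num_combinations_for_final_score_sequences(-1, [1]): A raises IndexError, B returns 0
import Mathlib
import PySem

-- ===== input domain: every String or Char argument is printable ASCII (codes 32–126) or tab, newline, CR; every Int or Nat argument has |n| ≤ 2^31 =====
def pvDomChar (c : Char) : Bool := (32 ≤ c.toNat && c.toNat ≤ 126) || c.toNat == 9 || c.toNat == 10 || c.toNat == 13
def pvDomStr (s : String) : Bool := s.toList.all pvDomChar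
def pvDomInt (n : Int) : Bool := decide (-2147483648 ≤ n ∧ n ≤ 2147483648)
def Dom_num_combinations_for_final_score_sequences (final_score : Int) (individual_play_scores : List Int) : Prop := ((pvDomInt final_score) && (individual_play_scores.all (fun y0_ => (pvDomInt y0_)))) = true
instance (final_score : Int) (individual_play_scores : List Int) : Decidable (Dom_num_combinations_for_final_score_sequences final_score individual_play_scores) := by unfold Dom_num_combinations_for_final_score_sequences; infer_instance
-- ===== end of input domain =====

-- B replaces A's bottom-up dp array swept over every total by demand-driven memoization:
-- an explicit DFS work stack resolves only the totals reachable from final_score into a dict.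

-- ===== PORT A =====
def num_combinations_for_final_score_sequences (final_score : Int) (individual_play_scores : List Int) : Int :=
  let dp : List Int := (PySem.List.pyRange 0 (final_score + 1) 1).map (fun _ => 0)
  let dp := PySem.List.pySetD dp 0 1  -- dp[0] = 1 (IndexError on empty dp, i.e. final_score < 0: outside Pre_)
  let dp := (PySem.List.pyRange 1 (final_score + 1) 1).foldl
      (fun dp x =>
        individual_play_scores.foldl
          (fun dp score =>
            if score ≤ x then
              -- dp[x] = dp[x] + dp[x - score]; in range for every input in Pre_ (reads/writes are exact there)
              PySem.List.pySetD dp x (PySem.List.pyGetD dp x 0 + PySem.List.pyGetD dp (x - score) 0)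
            else dp)
          dp)
      dp
  PySem.List.pyGetD dp (-1) 0  -- dp[-1]; nonempty under Pre_

-- ===== PORT B =====
-- the while loop of Source B as fuel recursion (head of the list = top of Python's stack, so
-- stack.extend(missing) pushes missing.reverse); the fuel bound is proved sufficient under
-- Pre_ (pvResolve below), so the fuel-exhausted branch is unreachable there.
def pvLoop (scores : List Int) : Nat → List Int → PySem.Dict Int Int → PySem.Dict Int Int
  | 0, _, cache => cache
  | _ + 1, [], cache => cache
  | fuel + 1, n :: rest, cache =>
    if cache.contains n then pvLoop scores fuel rest cache
    else
      let missing := (scores.filter (fun s => decide (s ≤ n) && !(cache.contains (n - s)))).map (fun s => n - s)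
      if missing.isEmpty then
        -- cache[n] = sum(cache[n - s] …); every such key is present here (missing is empty), so getD is exact
        pvLoop scores fuel rest
          (cache.insert n ((scores.filter (fun s => decide (s ≤ n))).map (fun s => cache.getD (n - s) 0)).sum)
      else
        pvLoop scores fuel (missing.reverse ++ n :: rest) cache

def num_combinations_for_final_score_sequences_alt (final_score : Int) (individual_play_scores : List Int) : Int :=
  let cache : PySem.Dict Int Int := PySem.Dict.insert PySem.Dict.empty 0 1  -- {0: 1}
  let cache := pvLoop individual_play_scores
      ((individual_play_scores.length + 2) ^ (final_score.toNat + 2) + 1) [final_score] cache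
  cache.getD final_score 0  -- cache[final_score]; the key is always present under Pre_

-- ===== PRECONDITION & SPEC =====
-- Pre_ excludes (a) final_score < 0 and, for final_score ≥ 1, (b) a negative play score — A raises
-- IndexError in both cases — and (c) a play score equal to 0, on which A still returns a value but one
-- produced accidentally by its in-place doubling dp[x] += dp[x] (the true count of sequences is not even
-- finite there, and B's demand-driven loop does not terminate); all are kept outside the claim.
def Pre_num_combinations_for_final_score_sequences (final_score : Int) (individual_play_scores : List Int) : Prop :=
  0 ≤ final_score ∧ (final_score = 0 ∨ ∀ s ∈ individual_play_scores, 1 ≤ s)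
instance (final_score : Int) (individual_play_scores : List Int) : Decidable (Pre_num_combinations_for_final_score_sequences final_score individual_play_scores) := by unfold Pre_num_combinations_for_final_score_sequences; infer_instance
def pvWitness_num_combinations_for_final_score_sequences : Int × List Int := (7, [1, 2, 3])
def Spec_num_combinations_for_final_score_sequences (final_score : Int) (individual_play_scores : List Int) (out : Int) : Prop := out = num_combinations_for_final_score_sequences_alt final_score individual_play_scores
instance (final_score : Int) (individual_play_scores : List Int) (out : Int) : Decidable (Spec_num_combinations_for_final_score_sequences final_score individual_play_scores out) := by unfold Spec_num_combinations_for_final_score_sequences; infer_instance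

-- ===== CLAIM (what is proved, stated in full; the proofs are below) =====
def Claim_equal_num_combinations_for_final_score_sequences : Prop := ∀ (final_score : Int) (individual_play_scores : List Int), Dom_num_combinations_for_final_score_sequences final_score individual_play_scores → Pre_num_combinations_for_final_score_sequences final_score individual_play_scores → Spec_num_combinations_for_final_score_sequences final_score individual_play_scores (num_combinations_for_final_score_sequences final_score individual_play_scores)

-- ===== LEMMAS AND PROOFS =====

-- The common mathematical value: pvC scores n = number of ordered sequences of plays (drawn from
-- `scores` with multiplicity, each counted when 1 ≤ s ≤ remaining) summing to n; fuel-based recursion.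
def pvCF (scores : List Int) : Nat → Nat → Int
  | 0, _ => 0
  | fuel + 1, n =>
    if n = 0 then 1
    else (scores.map (fun s =>
      if 1 ≤ s ∧ s ≤ (n : Int) then pvCF scores fuel (n - s.toNat) else 0)).sum

def pvC (scores : List Int) (n : Nat) : Int := pvCF scores (n + 1) n

theorem pvCF_fuel (scores : List Int) (f1 : Nat) : ∀ f2 n, n < f1 → n < f2 →
    pvCF scores f1 n = pvCF scores f2 n := by
  induction f1 with
  | zero => intro f2 n h; omega
  | succ f ih =>
    intro f2 n h1 h2
    match f2, h2 with
    | f2 + 1, h2 =>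
      simp only [pvCF]
      split
      · rfl
      · congr 1
        apply List.map_congr_left
        intro s _
        split
        · next hs => exact ih f2 (n - s.toNat) (by omega) (by omega)
        · rfl

theorem pvC_zero (scores : List Int) : pvC scores 0 = 1 := rfl

theorem pvC_succ (scores : List Int) (n : Nat) (hn : 1 ≤ n) :
    pvC scores n = (scores.map (fun s =>
      if 1 ≤ s ∧ s ≤ (n : Int) then pvC scores (n - s.toNat) else 0)).sum := by
  conv_lhs => rw [pvC, pvCF]
  rw [if_neg (by omega)]
  congr 1
  apply List.map_congr_left
  intro s _
  split
  · next hs => exact pvCF_fuel scores n (n - s.toNat + 1) (n - s.toNat) (by omega) (by omega)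
  · rfl

-- Setting at the junction index of an append.
theorem set_append_len {α : Type} (pre : List α) (a v : α) (suf : List α) :
    (pre ++ a :: suf).set pre.length v = pre ++ v :: suf := by
  induction pre with
  | nil => rfl
  | cons p ps ih => simp [ih]

theorem pyGetD_append_len (pre : List Int) (a : Int) (suf : List Int) (x : Nat)
    (h : pre.length = x) : PySem.List.pyGetD (pre ++ a :: suf) (x : Int) 0 = a := by
  subst h
  rw [PySem.List.pyGetD_natCast]
  simp [List.getD]

theorem pySetD_append_len (pre : List Int) (a v : Int) (suf : List Int) (x : Nat)
    (h : pre.length = x) : PySem.List.pySetD (pre ++ a :: suf) (x : Int) v = pre ++ v :: suf := by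
  subst h
  rw [PySem.List.pySetD_natCast, set_append_len]

theorem pyGetD_append_lt (pre : List Int) (rest : List Int) (i : Nat) (d : Int)
    (h : i < pre.length) : PySem.List.pyGetD (pre ++ rest) (i : Int) d = pre.getD i d := by
  rw [PySem.List.pyGetD_natCast]
  simp [List.getD, List.getElem?_append_left h]

-- A's inner loop over the remaining play scores, acting on dp = prefix ++ current :: suffix.
theorem innerA_fold (scores : List Int) (x : Nat) :
    ∀ (scores' : List Int), (∀ s ∈ scores', 1 ≤ s) → ∀ (acc : Int) (suf : List Int),
    scores'.foldl
      (fun dp score =>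
        if score ≤ (x : Int) then
          PySem.List.pySetD dp (x : Int) (PySem.List.pyGetD dp (x : Int) 0 + PySem.List.pyGetD dp ((x : Int) - score) 0)
        else dp)
      ((List.range x).map (pvC scores) ++ acc :: suf)
    = (List.range x).map (pvC scores) ++
        (acc + (scores'.map (fun s => if s ≤ (x : Int) then pvC scores (x - s.toNat) else 0)).sum) :: suf := by
  intro scores' hpos
  induction scores' with
  | nil => intro acc suf; simp
  | cons s ss ih =>
    intro acc suf
    have hs1 : (1 : Int) ≤ s := hpos s (by simp)
    have hss : ∀ u ∈ ss, (1 : Int) ≤ u := fun u hu => hpos u (by simp [hu])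
    have hxlen : ((List.range x).map (pvC scores)).length = x := by simp
    by_cases hsx : s ≤ (x : Int)
    · have hcast : (x : Int) - s = ((x - s.toNat : Nat) : Int) := by omega
      have hlt : x - s.toNat < x := by omega
      have hget2 : PySem.List.pyGetD ((List.range x).map (pvC scores) ++ acc :: suf) ((x : Int) - s) 0
          = pvC scores (x - s.toNat) := by
        rw [hcast, pyGetD_append_lt _ _ _ _ (by simpa using hlt)]
        simp [List.getD, hlt]
      simp only [List.foldl_cons, if_pos hsx,
        pyGetD_append_len _ _ _ _ hxlen, hget2, pySetD_append_len _ _ _ _ _ hxlen]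
      rw [ih hss]
      simp only [List.map_cons, List.sum_cons, if_pos hsx]
      ring_nf
    · simp only [List.foldl_cons, if_neg hsx]
      rw [ih hss]
      simp only [List.map_cons, List.sum_cons, if_neg hsx]
      ring_nf

-- A's outer loop: after the rounds x = 1 .. t the array is [pvC 0, …, pvC t] ++ zeros.
theorem outerA (scores : List Int) (hpos : ∀ s ∈ scores, 1 ≤ s) (n : Nat) :
    ∀ t ≤ n,
    (PySem.List.pyRange 1 ((t : Int) + 1) 1).foldl
      (fun dp x =>
        scores.foldl
          (fun dp score =>
            if score ≤ x then
              PySem.List.pySetD dp x (PySem.List.pyGetD dp x 0 + PySem.List.pyGetD dp (x - score) 0)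
            else dp)
          dp)
      ((1 : Int) :: List.replicate n 0)
    = (List.range (t + 1)).map (pvC scores) ++ List.replicate (n - t) 0 := by
  intro t
  induction t with
  | zero =>
    intro _
    rw [PySem.List.pyRange_one_eq_nil (by omega)]
    simp [List.range_one, pvC_zero]
  | succ t ih =>
    intro ht
    have hcast2 : (((t + 1 : Nat) : Int)) + 1 = ((t : Int) + 1) + 1 := by push_cast; ring
    rw [hcast2, PySem.List.pyRange_one_succ_right (by omega), List.foldl_append, ih (by omega)]
    have hrep : List.replicate (n - t) (0 : Int) = 0 :: List.replicate (n - (t + 1)) 0 := by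
      have h : n - t = (n - (t + 1)) + 1 := by omega
      rw [h, List.replicate_succ]
    rw [hrep]
    have hx : ((t : Int) + 1) = (((t + 1 : Nat) : Nat) : Int) := by push_cast; ring
    simp only [List.foldl_cons, List.foldl_nil, hx]
    rw [innerA_fold scores (t + 1) scores hpos 0 (List.replicate (n - (t + 1)) 0)]
    have hsum : (0 : Int) + (scores.map (fun s =>
        if s ≤ ((t + 1 : Nat) : Int) then pvC scores ((t + 1) - s.toNat) else 0)).sum
        = pvC scores (t + 1) := by
      rw [zero_add, pvC_succ scores (t + 1) (by omega)]
      congr 1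
      apply List.map_congr_left
      intro s hs
      have h1 : (1 : Int) ≤ s := hpos s hs
      by_cases h : s ≤ ((t + 1 : Nat) : Int)
      · rw [if_pos h, if_pos ⟨h1, h⟩]
      · rw [if_neg h, if_neg (by tauto)]
    rw [hsum]
    have hm : (List.range (t + 1 + 1)).map (pvC scores)
        = (List.range (t + 1)).map (pvC scores) ++ [pvC scores (t + 1)] := by
      rw [List.range_succ, List.map_append]; rfl
    rw [hm, List.append_assoc]; rfl

theorem A_main (scores : List Int) (hpos : ∀ s ∈ scores, 1 ≤ s) (n : Nat) :
    num_combinations_for_final_score_sequences (n : Int) scores = pvC scores n := by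
  unfold num_combinations_for_final_score_sequences
  have h0 : (PySem.List.pyRange 0 ((n : Int) + 1) 1).map (fun _ => (0 : Int))
      = List.replicate (n + 1) (0 : Int) := by
    have hl : (PySem.List.pyRange 0 ((n : Int) + 1) 1).length = n + 1 := by
      rw [PySem.List.length_pyRange_one]; omega
    rw [List.map_const', hl]
  have h1 : PySem.List.pySetD (List.replicate (n + 1) (0 : Int)) 0 1
      = (1 : Int) :: List.replicate n 0 := by
    rw [PySem.List.pySetD_of_nonneg _ _ (by omega), List.replicate_succ]
    rfl
  dsimp only
  rw [h0, h1, outerA scores hpos n n (le_refl n)]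
  have h2 : (List.range (n + 1)).map (pvC scores) ++ List.replicate (n - n) (0 : Int)
      = (List.range n).map (pvC scores) ++ [pvC scores n] := by
    rw [Nat.sub_self, List.replicate_zero, List.append_nil, List.range_succ, List.map_append]
    rfl
  rw [h2, PySem.List.pyGetD_neg_one_append_singleton]

-- B side -------------------------------------------------------------------

-- fuel weight of resolving one total n
def pvW (k n : Nat) : Nat := (k + 2) ^ (n + 2)

-- the cache invariant: 0 is cached, and every cached value is the true count pvC
def pvInv (scores : List Int) (c : PySem.Dict Int Int) : Prop :=
  c.contains 0 = true ∧ ∀ k v, c.get? k = some v → 0 ≤ k ∧ v = pvC scores k.toNat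

theorem pvLoop_nil (scores : List Int) (fuel : Nat) (c : PySem.Dict Int Int) :
    pvLoop scores fuel [] c = c := by
  cases fuel <;> simp [pvLoop]

theorem pvInv_getD (scores : List Int) (c : PySem.Dict Int Int) (h : pvInv scores c)
    (m : Int) (hc : c.contains m = true) : c.getD m 0 = pvC scores m.toNat := by
  rw [PySem.Dict.contains_eq_isSome_get?] at hc
  rcases hv : c.get? m with _ | v
  · rw [hv] at hc; simp at hc
  · rw [PySem.Dict.getD_eq_get?_getD, hv]
    exact (h.2 m v hv).2

theorem pvInv_insert (scores : List Int) (c : PySem.Dict Int Int) (h : pvInv scores c)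
    (n : Int) (hn : 0 ≤ n) : pvInv scores (c.insert n (pvC scores n.toNat)) := by
  constructor
  · rw [PySem.Dict.contains_insert]
    simp [h.1]
  · intro k v hv
    rw [PySem.Dict.get?_insert] at hv
    split at hv
    · next hk =>
      subst hk
      exact ⟨hn, by exact (Option.some_inj.mp hv).symm⟩
    · exact h.2 k v hv

-- sum over a filtered list as a sum over the whole list
theorem sum_map_filter_eq (l : List Int) (p : Int → Bool) (f : Int → Int) :
    ((l.filter p).map f).sum = (l.map (fun s => if p s then f s else 0)).sum := by
  induction l with
  | nil => rfl
  | cons a l ih =>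
    by_cases h : p a
    · simp [h, ih]
    · simp [h, ih]

-- once all children of n are cached, the computed sum is pvC n
theorem pvFinish (scores : List Int) (hpos : ∀ s ∈ scores, 1 ≤ s) (n : Int) (hn1 : 1 ≤ n)
    (c : PySem.Dict Int Int) (hinv : pvInv scores c)
    (hall : ∀ s ∈ scores, s ≤ n → c.contains (n - s) = true) :
    ((scores.filter (fun s => decide (s ≤ n))).map (fun s => c.getD (n - s) 0)).sum
      = pvC scores n.toNat := by
  rw [sum_map_filter_eq, pvC_succ scores n.toNat (by omega)]
  congr 1
  apply List.map_congr_left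
  intro s hs
  have h1 : (1 : Int) ≤ s := hpos s hs
  by_cases h : s ≤ n
  · rw [if_pos (by simpa using h), if_pos ⟨h1, by omega⟩,
      pvInv_getD scores c hinv (n - s) (hall s hs h)]
    congr 1
    omega
  · rw [if_neg (by simpa using h), if_neg (by omega)]

-- resolving a list of already-small totals one after the other
theorem pvChain (scores : List Int) (N : Nat)
    (HR : ∀ n : Int, 0 ≤ n → n.toNat ≤ N → ∀ c, pvInv scores c →
      ∃ st c', st ≤ pvW scores.length n.toNat ∧ pvInv scores c' ∧ c'.contains n = true ∧
        (∀ x, c.contains x = true → c'.contains x = true) ∧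
        (∀ x, c'.contains x = true → c.contains x = true ∨ x ≤ n) ∧
        (∀ fuel rest, pvLoop scores (fuel + st) (n :: rest) c = pvLoop scores fuel rest c')) :
    ∀ L : List Int, (∀ m ∈ L, 0 ≤ m ∧ m.toNat ≤ N) → ∀ c, pvInv scores c →
    ∃ st c', st ≤ L.length * pvW scores.length N ∧ pvInv scores c' ∧
      (∀ m ∈ L, c'.contains m = true) ∧
      (∀ x, c.contains x = true → c'.contains x = true) ∧
      (∀ x, c'.contains x = true → c.contains x = true ∨ ∃ m ∈ L, x ≤ m) ∧
      (∀ fuel rest, pvLoop scores (fuel + st) (L ++ rest) c = pvLoop scores fuel rest c') := by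
  intro L
  induction L with
  | nil =>
    intro _ c hinv
    exact ⟨0, c, by simp, hinv, by simp, fun x h => h, fun x h => Or.inl h,
      fun fuel rest => by simp⟩
  | cons m L ih =>
    intro hmem c hinv
    obtain ⟨hm0, hmN⟩ := hmem m (by simp)
    obtain ⟨st1, c1, hst1, hinv1, hcont1, hmono1, hkeys1, htr1⟩ := HR m hm0 hmN c hinv
    obtain ⟨st2, c2, hst2, hinv2, hall2, hmono2, hkeys2, htr2⟩ :=
      ih (fun m' hm' => hmem m' (by simp [hm'])) c1 hinv1
    refine ⟨st1 + st2, c2, ?_, hinv2, ?_, fun x hx => hmono2 x (hmono1 x hx), ?_, ?_⟩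
    · have hW : pvW scores.length m.toNat ≤ pvW scores.length N :=
        Nat.pow_le_pow_right (by omega) (by omega)
      have : (m :: L).length * pvW scores.length N
          = L.length * pvW scores.length N + pvW scores.length N := by
        simp [Nat.succ_mul]
      omega
    · intro m' hm'
      rcases List.mem_cons.mp hm' with h | h
      · subst h; exact hmono2 m' hcont1
      · exact hall2 m' h
    · intro x hx
      rcases hkeys2 x hx with h | h
      · rcases hkeys1 x h with h' | h'
        · exact Or.inl h'
        · exact Or.inr ⟨m, by simp, h'⟩
      · obtain ⟨m', hm', hx'⟩ := h
        exact Or.inr ⟨m', by simp [hm'], hx'⟩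
    · intro fuel rest
      have h1 : fuel + (st1 + st2) = (fuel + st2) + st1 := by omega
      rw [h1, List.cons_append, htr1 (fuel + st2) (L ++ rest), htr2 fuel rest]

-- the big-step lemma: with fuel pvW n, the loop resolves a nonnegative top n into the cache
theorem pvResolve (scores : List Int) (hpos : ∀ s ∈ scores, 1 ≤ s) :
    ∀ N : Nat, ∀ n : Int, 0 ≤ n → n.toNat ≤ N → ∀ c, pvInv scores c →
    ∃ st c', st ≤ pvW scores.length n.toNat ∧ pvInv scores c' ∧ c'.contains n = true ∧
      (∀ x, c.contains x = true → c'.contains x = true) ∧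
      (∀ x, c'.contains x = true → c.contains x = true ∨ x ≤ n) ∧
      (∀ fuel rest, pvLoop scores (fuel + st) (n :: rest) c = pvLoop scores fuel rest c') := by
  intro N
  induction N with
  | zero =>
    intro n hn0 hnN c hinv
    have hn : n = 0 := by omega
    subst hn
    exact ⟨1, c, Nat.one_le_pow _ _ (by omega), hinv, hinv.1, fun x h => h, fun x h => Or.inl h,
      fun fuel rest => by simp [pvLoop, hinv.1]⟩
  | succ N ih =>
    intro n hn0 hnN c hinv
    by_cases hc : c.contains n = true
    · exact ⟨1, c, Nat.one_le_pow _ _ (by omega), hinv, hc, fun x h => h, fun x h => Or.inl h,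
        fun fuel rest => by simp [pvLoop, hc]⟩
    · have hcf : c.contains n = false := by
        cases h : c.contains n
        · rfl
        · exact absurd h hc
      have hn1 : 1 ≤ n := by
        rcases eq_or_lt_of_le hn0 with h | h
        · exact absurd (h ▸ hinv.1) hc
        · omega
      set L := (scores.filter (fun s => decide (s ≤ n) && !(c.contains (n - s)))).map
          (fun s => n - s) with hL
      have hmemL : ∀ m ∈ L, ∃ s ∈ scores, s ≤ n ∧ c.contains (n - s) = false ∧ m = n - s := by
        intro m hm
        rw [hL, List.mem_map] at hm
        obtain ⟨s, hs, hms⟩ := hm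
        rw [List.mem_filter] at hs
        refine ⟨s, hs.1, ?_, ?_, hms.symm⟩
        · have := hs.2; simp at this; exact this.1
        · have := hs.2; simp at this; exact this.2
      have hLprops : ∀ m ∈ L.reverse, 0 ≤ m ∧ m.toNat ≤ n.toNat - 1 := by
        intro m hm
        obtain ⟨s, hs, hsn, _, hms⟩ := hmemL m (List.mem_reverse.mp hm)
        have h1 : (1 : Int) ≤ s := hpos s hs
        subst hms
        omega
      have HR' : ∀ n' : Int, 0 ≤ n' → n'.toNat ≤ n.toNat - 1 → ∀ c', pvInv scores c' →
          ∃ st c'', st ≤ pvW scores.length n'.toNat ∧ pvInv scores c'' ∧ c''.contains n' = true ∧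
            (∀ x, c'.contains x = true → c''.contains x = true) ∧
            (∀ x, c''.contains x = true → c'.contains x = true ∨ x ≤ n') ∧
            (∀ fuel rest, pvLoop scores (fuel + st) (n' :: rest) c' = pvLoop scores fuel rest c'') :=
        fun n' h0 hN' c' hi => ih n' h0 (by omega) c' hi
      obtain ⟨st2, c2, hst2, hinv2, hall2, hmono2, hkeys2, htr2⟩ :=
        pvChain scores (n.toNat - 1) HR' L.reverse hLprops c hinv
      -- all children of n are cached in c2
      have hchild2 : ∀ s ∈ scores, s ≤ n → c2.contains (n - s) = true := by
        intro s hs hsn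
        cases h : c.contains (n - s)
        · refine hall2 (n - s) ?_
          rw [List.mem_reverse, hL, List.mem_map]
          exact ⟨s, List.mem_filter.mpr ⟨hs, by simp [hsn, h]⟩, rfl⟩
        · exact hmono2 (n - s) h
      by_cases hLnil : L = []
      · -- every child was already cached: one step inserts pvC n
        have hchild : ∀ s ∈ scores, s ≤ n → c.contains (n - s) = true := by
          intro s hs hsn
          cases h : c.contains (n - s)
          · exfalso
            have : (n - s) ∈ L := by
              rw [hL, List.mem_map]
              exact ⟨s, List.mem_filter.mpr ⟨hs, by simp [hsn, h]⟩, rfl⟩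
            rw [hLnil] at this
            simp at this
          · rfl
        have hT := pvFinish scores hpos n hn1 c hinv hchild
        refine ⟨1, c.insert n (pvC scores n.toNat), Nat.one_le_pow _ _ (by omega),
          pvInv_insert scores c hinv n hn0, ?_, ?_, ?_, ?_⟩
        · rw [PySem.Dict.contains_insert]; simp
        · intro x hx
          rw [PySem.Dict.contains_insert]; simp [hx]
        · intro x hx
          rw [PySem.Dict.contains_insert] at hx
          rcases Bool.or_eq_true_iff.mp hx with h | h
          · right
            have : x = n := by simpa using h
            omega
          · exact Or.inl h
        · intro fuel rest
          have hempty : ((scores.filter (fun s => decide (s ≤ n) && !(c.contains (n - s)))).map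
              (fun s => n - s)).isEmpty = true := by
            rw [← hL, hLnil]; rfl
          simp only [pvLoop, hcf, Bool.false_eq_true, if_false, hempty, if_true]
          rw [hT]
      · -- push the missing children, resolve them, then revisit n
        have hc2f : c2.contains n = false := by
          cases h : c2.contains n
          · rfl
          · exfalso
            rcases hkeys2 n h with h' | h'
            · rw [hcf] at h'; exact absurd h' (by simp)
            · obtain ⟨m, hm, hnm⟩ := h'
              obtain ⟨s, hs, hsn, _, hms⟩ := hmemL m (List.mem_reverse.mp hm)
              have h1 : (1 : Int) ≤ s := hpos s hs
              omega
        have hfilter2 : (scores.filter (fun s => decide (s ≤ n) && !(c2.contains (n - s)))) = [] := by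
          rw [List.filter_eq_nil_iff]
          intro s hs
          by_cases h : s ≤ n
          · simp [h, hchild2 s hs h]
          · simp [h]
        have hT2 := pvFinish scores hpos n hn1 c2 hinv2 hchild2
        refine ⟨st2 + 2, c2.insert n (pvC scores n.toNat), ?_,
          pvInv_insert scores c2 hinv2 n hn0, ?_, ?_, ?_, ?_⟩
        · -- st2 + 2 ≤ (k+2)^(n.toNat+2)
          have hlen : L.reverse.length ≤ scores.length := by
            rw [List.length_reverse, hL, List.length_map]
            exact List.length_filter_le _ _
          have h1 : st2 ≤ scores.length * pvW scores.length (n.toNat - 1) :=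
            le_trans hst2 (Nat.mul_le_mul_right _ hlen)
          have hX : 1 ≤ (scores.length + 2) ^ (n.toNat - 1 + 2) := Nat.one_le_pow _ _ (by omega)
          have hpow : (scores.length + 2) ^ (n.toNat + 2)
              = (scores.length + 2) ^ (n.toNat - 1 + 2) * (scores.length + 2) := by
            rw [← pow_succ]
            congr 1
            omega
          unfold pvW at h1 ⊢
          nlinarith
        · rw [PySem.Dict.contains_insert]; simp
        · intro x hx
          rw [PySem.Dict.contains_insert]; simp [hmono2 x hx]
        · intro x hx
          rw [PySem.Dict.contains_insert] at hx
          rcases Bool.or_eq_true_iff.mp hx with h | h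
          · right
            have : x = n := by simpa using h
            omega
          · rcases hkeys2 x h with h' | h'
            · exact Or.inl h'
            · right
              obtain ⟨m, hm, hxm⟩ := h'
              obtain ⟨s, hs, hsn, _, hms⟩ := hmemL m (List.mem_reverse.mp hm)
              have h1 : (1 : Int) ≤ s := hpos s hs
              omega
        · intro fuel rest
          have hne : ((scores.filter (fun s => decide (s ≤ n) && !(c.contains (n - s)))).map
              (fun s => n - s)).isEmpty = false := by
            rw [← hL]
            cases hLc : L
            · exact absurd hLc hLnil
            · rfl
          have hstep1 : ∀ f, pvLoop scores (f + 1) (n :: rest) c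
              = pvLoop scores f (L.reverse ++ n :: rest) c := by
            intro f
            simp only [pvLoop, hcf, Bool.false_eq_true, if_false, hne]
            rw [← hL]
          have hstep3 : pvLoop scores (fuel + 1) (n :: rest) c2
              = pvLoop scores fuel rest (c2.insert n (pvC scores n.toNat)) := by
            have hempty2 : ((scores.filter (fun s => decide (s ≤ n) && !(c2.contains (n - s)))).map
                (fun s => n - s)).isEmpty = true := by
              rw [hfilter2]; rfl
            simp only [pvLoop, hc2f, Bool.false_eq_true, if_false, hempty2, if_true]
            rw [hT2]
          calc pvLoop scores (fuel + (st2 + 2)) (n :: rest) c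
              = pvLoop scores ((fuel + 1 + st2) + 1) (n :: rest) c := by ring_nf
            _ = pvLoop scores (fuel + 1 + st2) (L.reverse ++ n :: rest) c := hstep1 _
            _ = pvLoop scores (fuel + 1) (n :: rest) c2 := htr2 (fuel + 1) (n :: rest)
            _ = pvLoop scores fuel rest (c2.insert n (pvC scores n.toNat)) := hstep3

theorem pvInv_init (scores : List Int) :
    pvInv scores (PySem.Dict.insert (PySem.Dict.empty : PySem.Dict Int Int) 0 1) := by
  constructor
  · exact PySem.Dict.contains_insert_self _ _ _
  · intro k v hv
    rw [PySem.Dict.get?_insert] at hv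
    split at hv
    · next hk =>
      subst hk
      exact ⟨le_refl 0, by simpa [pvC_zero] using (Option.some_inj.mp hv).symm⟩
    · rw [PySem.Dict.get?_empty] at hv
      exact absurd hv (by simp)

theorem B_main (scores : List Int) (hpos : ∀ s ∈ scores, 1 ≤ s) (n : Nat) :
    num_combinations_for_final_score_sequences_alt (n : Int) scores = pvC scores n := by
  unfold num_combinations_for_final_score_sequences_alt
  dsimp only
  obtain ⟨st, c', hst, hinv', hcont, _, _, htr⟩ :=
    pvResolve scores hpos n (n : Int) (by omega) (by simp) _ (pvInv_init scores)
  have hfuel : (scores.length + 2) ^ ((n : Int).toNat + 2) + 1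
      = ((scores.length + 2) ^ ((n : Int).toNat + 2) + 1 - st) + st := by
    unfold pvW at hst
    simp only [Int.toNat_natCast] at hst ⊢
    omega
  rw [hfuel, htr _ [], pvLoop_nil]
  have := pvInv_getD scores c' hinv' (n : Int) hcont
  simpa using this

theorem zero_case (scores : List Int) :
    num_combinations_for_final_score_sequences 0 scores = 1 ∧
    num_combinations_for_final_score_sequences_alt 0 scores = 1 := by
  constructor
  · unfold num_combinations_for_final_score_sequences
    dsimp only
    rw [show PySem.List.pyRange 1 (0 + 1) 1 = [] from by decide, List.foldl_nil]
    decide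
  · unfold num_combinations_for_final_score_sequences_alt
    dsimp only
    have h0 : (PySem.Dict.insert (PySem.Dict.empty : PySem.Dict Int Int) 0 1).contains 0 = true :=
      PySem.Dict.contains_insert_self _ _ _
    rw [show (scores.length + 2) ^ ((0 : Int).toNat + 2) + 1
        = ((scores.length + 2) ^ ((0 : Int).toNat + 2)) + 1 from rfl]
    simp only [pvLoop, h0, if_true]
    rw [pvLoop_nil]
    rw [PySem.Dict.getD_insert]
    simp

-- ===== VERDICT (by name: the statement is the Claim_ definition above) =====
theorem num_combinations_for_final_score_sequences_spec : Claim_equal_num_combinations_for_final_score_sequences := by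
  intro fs scores _ hpre
  unfold Spec_num_combinations_for_final_score_sequences
  obtain ⟨hfs, hcase⟩ := hpre
  rcases hcase with h0 | hpos
  · subst h0
    rw [(zero_case scores).1, (zero_case scores).2]
  · have hn : fs = ((fs.toNat : Nat) : Int) := (Int.toNat_of_nonneg hfs).symm
    rw [hn, A_main scores hpos fs.toNat, B_main scores hpos fs.toNat]
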